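-- pv_equiv track=rewrite | github.com/dnrudzx/Python | Programmers/Level1/모의고사.py | solution
-- ===== SOURCE A (Python) =====
-- def solution(answers):
--     result = []
--     collect_list = [0, 0, 0]
--     a = [1, 2, 3, 4, 5]
--     b = [2, 1, 2, 3, 2, 4, 2, 5]
--     c = [3, 3, 1, 1, 2, 2, 4, 4, 5, 5]
--     for index, answer in enumerate(answers):
--         a_index = index % len(a)
--         b_index = index % len(b)
--         c_index = index % len(c)
--         if answer == a[a_index]: collect_list[0] += 1
--         if answer == b[b_index]: collect_list[1] += 1
--         if answer == c[c_index]: collect_list[2] += 1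
--     for index, i in enumerate(collect_list):
--         if i == max(collect_list):
--             result.append(index + 1)
--     return result
-- ===== SOURCE B (Python) =====
-- def solution(answers):
--     # Histogram algorithm: 40 = lcm(5, 8, 10), so each pattern's pick at position i
--     # depends only on i % 40.  Build a frequency table keyed by (i % 40, answer),
--     # then read each pattern's score off the table instead of scanning the answers
--     # once per pattern.
--     hist = {}
--     for i, ans in enumerate(answers):
--         key = (i % 40, ans)
--         hist[key] = hist.get(key, 0) + 1
--     patterns = [[1, 2, 3, 4, 5],
--                 [2, 1, 2, 3, 2, 4, 2, 5],
--                 [3, 3, 1, 1, 2, 2, 4, 4, 5, 5]]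
--     scores = [sum(hist.get((ph, p[ph % len(p)]), 0) for ph in range(40))
--               for p in patterns]
--     top = max(scores)
--     return [k + 1 for k, s in enumerate(scores) if s == top]
-- ===== Notes on version B (the rewrite author's own statement) =====
-- stated objective: alternative
-- what changed: Replaced A's per-element comparison against the three cyclic patterns with a frequency-table algorithm: one pass builds a histogram keyed by (index mod 40, answer) (40 = lcm of the pattern lengths), and each pattern's score is then summed off that fixed 40-entry table, trading per-pattern comparisons for a single hash-counting pass plus constant-size table lookups.
import Mathlib
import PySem

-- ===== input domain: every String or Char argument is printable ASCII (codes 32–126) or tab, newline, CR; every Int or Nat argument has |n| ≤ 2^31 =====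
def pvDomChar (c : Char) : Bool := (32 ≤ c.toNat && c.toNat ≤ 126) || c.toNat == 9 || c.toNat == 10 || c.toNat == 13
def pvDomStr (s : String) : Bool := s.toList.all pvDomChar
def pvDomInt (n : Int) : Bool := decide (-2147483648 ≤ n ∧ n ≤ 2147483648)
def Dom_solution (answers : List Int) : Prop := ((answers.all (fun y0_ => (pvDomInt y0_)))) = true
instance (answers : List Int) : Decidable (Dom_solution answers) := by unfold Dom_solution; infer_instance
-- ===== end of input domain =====

-- B replaces A's fused per-element pattern comparisons with a histogram keyed by
-- (index mod 40, answer) built in one pass; each pattern's score is then summed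
-- off that fixed table (40 = lcm of the pattern lengths); objective: alternative
-- algorithm, same O(n) cost.


-- ===== PORT A =====
-- Python enumerate(answers) is ported via List.zipIdx (pairs (element, 0-based Nat
-- index)); a[index % len(a)] always has its index in range, so getD is exact there.
-- max(collect_list), recomputed on the unchanged 3-list, is the binary max of the three.
def solA : List Int := [1, 2, 3, 4, 5]
def solB : List Int := [2, 1, 2, 3, 2, 4, 2, 5]
def solC : List Int := [3, 3, 1, 1, 2, 2, 4, 4, 5, 5]

def solution (answers : List Int) : List Int :=
  let collect :=
    (answers.zipIdx).foldl
      (fun (cl : Int × Int × Int) (p : Int × Nat) =>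
        let c0 := if p.1 = solA.getD (p.2 % solA.length) 0 then cl.1 + 1 else cl.1
        let c1 := if p.1 = solB.getD (p.2 % solB.length) 0 then cl.2.1 + 1 else cl.2.1
        let c2 := if p.1 = solC.getD (p.2 % solC.length) 0 then cl.2.2 + 1 else cl.2.2
        (c0, c1, c2))
      ((0 : Int), (0 : Int), (0 : Int))
  let m := max collect.1 (max collect.2.1 collect.2.2)
  (if collect.1 = m then [(1 : Int)] else []) ++
  (if collect.2.1 = m then [(2 : Int)] else []) ++
  (if collect.2.2 = m then [(3 : Int)] else [])

-- ===== PORT B =====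
-- hist[key] = hist.get(key, 0) + 1 over enumerate(answers) is the PySem.Dict
-- insert/getD counting fold; the index i (a nonnegative Python int) becomes the Nat
-- zipIdx index cast to Int, so i % 40 with plain Int.% is exact; ph ranges over
-- range(40) = PySem.List.pyRange 0 40 1 (nonnegative), so p[ph % len(p)] is
-- getD (ph.toNat % p.length); max(scores) on the nonempty 3-list is foldl max;
-- the final comprehension is filterMap over enumerate(scores).
def solution_alt (answers : List Int) : List Int :=
  let hist : PySem.Dict (Int × Int) Int :=
    (answers.zipIdx).foldl
      (fun d q =>
        d.insert (((q.2 : Int)) % 40, q.1) (d.getD (((q.2 : Int)) % 40, q.1) 0 + 1))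
      PySem.Dict.empty
  let scores : List Int :=
    ([[1, 2, 3, 4, 5],
      [2, 1, 2, 3, 2, 4, 2, 5],
      [3, 3, 1, 1, 2, 2, 4, 4, 5, 5]] : List (List Int)).map
      (fun p =>
        ((PySem.List.pyRange 0 40 1).map
          (fun ph => hist.getD (ph, p.getD (ph.toNat % p.length) 0) 0)).sum)
  let top := scores.foldl max (scores.getD 0 0)
  (scores.zipIdx).filterMap
    (fun q => if q.1 = top then some ((q.2 : Int) + 1) else none)

-- ===== PRECONDITION & SPEC =====
def Spec_solution (answers : List Int) (out : List Int) : Prop := out = solution_alt answers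
instance (answers : List Int) (out : List Int) : Decidable (Spec_solution answers out) := by unfold Spec_solution; infer_instance

-- ===== CLAIM (what is proved, stated in full; the proofs are below) =====
def Claim_equal_solution : Prop := ∀ (answers : List Int), Dom_solution answers → Spec_solution answers (solution answers)

-- ===== LEMMAS AND PROOFS =====

-- A's fused fold computes exactly the three independent per-pattern indicator sums.
theorem fold_eq_scores (l : List (Int × Nat)) (x y z : Int) :
    l.foldl
      (fun (cl : Int × Int × Int) (p : Int × Nat) =>
        let c0 := if p.1 = solA.getD (p.2 % solA.length) 0 then cl.1 + 1 else cl.1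
        let c1 := if p.1 = solB.getD (p.2 % solB.length) 0 then cl.2.1 + 1 else cl.2.1
        let c2 := if p.1 = solC.getD (p.2 % solC.length) 0 then cl.2.2 + 1 else cl.2.2
        (c0, c1, c2))
      (x, y, z)
    = (x + ((l.map (fun q => if q.1 = solA.getD (q.2 % solA.length) 0 then (1 : Int) else 0)).sum),
       y + ((l.map (fun q => if q.1 = solB.getD (q.2 % solB.length) 0 then (1 : Int) else 0)).sum),
       z + ((l.map (fun q => if q.1 = solC.getD (q.2 % solC.length) 0 then (1 : Int) else 0)).sum)) := by
  induction l generalizing x y z with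
  | nil => simp
  | cons h t ih =>
    simp only [List.foldl_cons, List.map_cons, List.sum_cons]
    split_ifs <;> simp only [ih, Prod.mk.injEq] <;> refine ⟨by ring, by ring, by ring⟩

-- B's counting fold is Counter of the (i % 40, answer) key list.
theorem hist_eq_counter (l : List (Int × Nat)) :
    l.foldl
      (fun (d : PySem.Dict (Int × Int) Int) q =>
        d.insert (((q.2 : Int)) % 40, q.1) (d.getD (((q.2 : Int)) % 40, q.1) 0 + 1))
      PySem.Dict.empty
    = PySem.Dict.counter (l.map (fun q => (((q.2 : Int)) % 40, q.1))) := by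
  rw [← PySem.Dict.foldl_insert_getD_add_one_eq_counter, List.foldl_map]

-- A sum of point-indicators over a Nodup list containing m picks out the value at m.
theorem sum_point_indicator (a fm : Int) (m : Int) (f : Int → Int) :
    ∀ (ks : List Int), ks.Nodup → m ∈ ks → fm = f m →
    ((ks.map (fun ph => if ph = m ∧ a = f ph then (1 : Int) else 0)).sum)
    = if a = fm then (1 : Int) else 0 := by
  intro ks
  induction ks with
  | nil => intro _ hm; cases hm
  | cons k t ih =>
    intro hnd hm hfm
    by_cases hk : m = k
    · subst hk
      have hzero : (t.map (fun ph => if ph = m ∧ a = f ph then (1 : Int) else 0)).sum = 0 := by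
        apply List.sum_eq_zero
        intro x hx
        rcases List.mem_map.1 hx with ⟨ph, hph, rfl⟩
        have : ¬ (ph = m ∧ a = f ph) := by
          rintro ⟨rfl, -⟩
          exact (List.nodup_cons.1 hnd).1 hph
        simp [this]
      simp [hzero, hfm]
    · have hmt : m ∈ t := (List.mem_cons.1 hm).resolve_left hk
      have hhead : ¬ (k = m ∧ a = f k) := by
        rintro ⟨rfl, -⟩
        exact (List.nodup_cons.1 hnd).1 hmt
      simp [hhead, ih (List.nodup_cons.1 hnd).2 hmt hfm]

-- Summing counts of (ph, f ph) over a Nodup key list covering all phases equals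
-- the per-element indicator sum.
theorem sum_count_eq (f : Int → Int) (ks : List Int) (hnd : ks.Nodup)
    (l : List (Int × Int)) (hl : ∀ k ∈ l, k.1 ∈ ks) :
    ((ks.map (fun ph => (l.count (ph, f ph) : Int))).sum)
    = ((l.map (fun k => if k.2 = f k.1 then (1 : Int) else 0)).sum) := by
  induction l with
  | nil => simp
  | cons p t ih =>
    have ht : ∀ k ∈ t, k.1 ∈ ks := fun k hk => hl k (List.mem_cons_of_mem _ hk)
    have hcnt : ∀ ph, ((p :: t).count (ph, f ph) : Int)
        = (t.count (ph, f ph) : Int) + (if ph = p.1 ∧ p.2 = f ph then (1 : Int) else 0) := by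
      intro ph
      rw [List.count_cons]
      by_cases h : (ph, f ph) = p
      · have hiff : ph = p.1 ∧ p.2 = f ph := by
          obtain ⟨p1, p2⟩ := p
          obtain ⟨h1, h2⟩ := Prod.mk.injEq .. ▸ h
          exact ⟨h1, h2.symm⟩
        simp only [beq_iff_eq]
        rw [if_pos h.symm, if_pos hiff]
        push_cast; ring
      · have h2 : ¬ (ph = p.1 ∧ p.2 = f ph) := by
          rintro ⟨h1, h2⟩
          exact h (by obtain ⟨p1, p2⟩ := p; simp_all)
        simp only [beq_iff_eq]
        rw [if_neg (fun hpe => h hpe.symm), if_neg h2]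
        push_cast; ring
    calc ((ks.map (fun ph => ((p :: t).count (ph, f ph) : Int))).sum)
        = ((ks.map (fun ph => (t.count (ph, f ph) : Int)
            + (if ph = p.1 ∧ p.2 = f ph then (1 : Int) else 0))).sum) := by
          exact congrArg List.sum (List.map_congr_left (fun ph _ => hcnt ph))
      _ = ((ks.map (fun ph => (t.count (ph, f ph) : Int))).sum)
            + ((ks.map (fun ph => if ph = p.1 ∧ p.2 = f ph then (1 : Int) else 0)).sum) := by
          rw [← List.sum_map_add]
      _ = ((t.map (fun k => if k.2 = f k.1 then (1 : Int) else 0)).sum)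
            + (if p.2 = f p.1 then (1 : Int) else 0) := by
          rw [ih ht, sum_point_indicator p.2 (f p.1) p.1 f ks hnd (hl p (List.mem_cons_self)) rfl]
      _ = (((p :: t).map (fun k => if k.2 = f k.1 then (1 : Int) else 0)).sum) := by
          simp; ring

-- range(40) is Nodup and contains every i % 40.
theorem mod40_mem (i : Nat) : ((i : Int) % 40) ∈ PySem.List.pyRange 0 40 1 := by
  rw [PySem.List.mem_pyRange_one]
  omega

-- B's table-lookup sum for a pattern of length dividing 40 equals A's indicator sum.
theorem score_eq (p : List Int) (hdvd : p.length ∣ 40) (l : List (Int × Nat)) :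
    ((PySem.List.pyRange 0 40 1).map
      (fun ph =>
        (PySem.Dict.counter (l.map (fun q => (((q.2 : Int)) % 40, q.1)))).getD
          (ph, p.getD (ph.toNat % p.length) 0) 0)).sum
    = ((l.map (fun q => if q.1 = p.getD (q.2 % p.length) 0 then (1 : Int) else 0)).sum) := by
  have hnd : (PySem.List.pyRange 0 40 1).Nodup := PySem.List.nodup_pyRange_one 0 40
  have hcov : ∀ k ∈ l.map (fun q : Int × Nat => (((q.2 : Int)) % 40, q.1)),
      k.1 ∈ PySem.List.pyRange 0 40 1 := by
    intro k hk
    rcases List.mem_map.1 hk with ⟨q, _, rfl⟩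
    exact mod40_mem q.2
  calc ((PySem.List.pyRange 0 40 1).map
          (fun ph =>
            (PySem.Dict.counter (l.map (fun q => (((q.2 : Int)) % 40, q.1)))).getD
              (ph, p.getD (ph.toNat % p.length) 0) 0)).sum
      = ((PySem.List.pyRange 0 40 1).map
          (fun ph =>
            ((l.map (fun q => (((q.2 : Int)) % 40, q.1))).count
              (ph, p.getD (ph.toNat % p.length) 0) : Int))).sum := by
        simp [PySem.Dict.getD_counter]
    _ = (((l.map (fun q => (((q.2 : Int)) % 40, q.1))).map
          (fun k => if k.2 = p.getD (k.1.toNat % p.length) 0 then (1 : Int) else 0)).sum) :=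
        sum_count_eq (fun ph => p.getD (ph.toNat % p.length) 0) _ hnd _ hcov
    _ = ((l.map (fun q => if q.1 = p.getD (q.2 % p.length) 0 then (1 : Int) else 0)).sum) := by
        rw [List.map_map]
        refine congrArg List.sum (List.map_congr_left ?_)
        intro q _
        have h1 : (((q.2 : Int)) % 40).toNat = q.2 % 40 := by omega
        have h2 : q.2 % 40 % p.length = q.2 % p.length := Nat.mod_mod_of_dvd _ hdvd
        simp [Function.comp, h1, h2]

-- The argmax selection over the three scores: A's unrolled tail equals B's
-- filterMap-over-zipIdx comprehension with top = foldl max.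
theorem final_eq (s0 s1 s2 : Int) :
    (if s0 = max s0 (max s1 s2) then [(1 : Int)] else []) ++
    (if s1 = max s0 (max s1 s2) then [(2 : Int)] else []) ++
    (if s2 = max s0 (max s1 s2) then [(3 : Int)] else [])
    = (([s0, s1, s2] : List Int).zipIdx).filterMap
        (fun q => if q.1 = ([s0, s1, s2] : List Int).foldl max (([s0, s1, s2] : List Int).getD 0 0) then some ((q.2 : Int) + 1) else none) := by
  have htop : ([s0, s1, s2] : List Int).foldl max (([s0, s1, s2] : List Int).getD 0 0) = max s0 (max s1 s2) := by
    simp [List.foldl]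
  rw [htop]
  simp only [List.zipIdx_cons, List.zipIdx_nil, List.filterMap_cons, List.filterMap_nil]
  split_ifs <;> rfl

-- ===== VERDICT (by name: the statement is the Claim_ definition above) =====
theorem solution_spec : Claim_equal_solution := by
  intro answers _
  show solution answers = solution_alt answers
  unfold solution solution_alt
  simp only [fold_eq_scores, zero_add, hist_eq_counter, List.map_cons, List.map_nil]
  rw [score_eq [1, 2, 3, 4, 5] (by norm_num) answers.zipIdx,
      score_eq [2, 1, 2, 3, 2, 4, 2, 5] (by norm_num) answers.zipIdx,
      score_eq [3, 3, 1, 1, 2, 2, 4, 4, 5, 5] (by norm_num) answers.zipIdx]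
  show _ = _
  rw [show ([1, 2, 3, 4, 5] : List Int) = solA from rfl,
      show ([2, 1, 2, 3, 2, 4, 2, 5] : List Int) = solB from rfl,
      show ([3, 3, 1, 1, 2, 2, 4, 4, 5, 5] : List Int) = solC from rfl]
  exact final_eq _ _ _
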